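-- pv_equiv track=rewrite | github.com/hoya9802/Algorithm-Notes | 프로그래머스/2/178870. 연속된 부분 수열의 합/연속된 부분 수열의 합.py | solution
-- ===== SOURCE A (Python) =====
-- def solution(sequence, k):
--     end, interval_sum = 0, 0; first, second = 0, 1000001
--     for start in range(len(sequence)):
--         while end < len(sequence) and interval_sum < k:
--             interval_sum += sequence[end]
--             end += 1
--         if interval_sum == k and second - first > (end-1) - start:
--             first, second = start, end -1
--         interval_sum -= sequence[start]
--     return [first, second]
-- ===== SOURCE B (Python) =====
-- def solution(sequence, k):
--     # Prefix sums + a max segment tree: the next window end is found by a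
--     # "first index >= lo with prefix[i] >= target" tree descent.
--     prefix = [0]
--     for x in sequence:
--         prefix.append(prefix[-1] + x)
--     m = len(prefix)
--
--     def build(a, b):
--         if b - a == 1:
--             return (prefix[a], None, None)
--         mid = (a + b) // 2
--         left = build(a, mid)
--         right = build(mid, b)
--         return (max(left[0], right[0]), left, right)
--
--     root = build(0, m)
--
--     def first_ge(node, a, b, lo, t):
--         if node[0] < t or b <= lo:
--             return None
--         if node[1] is None:
--             return a
--         mid = (a + b) // 2
--         r = first_ge(node[1], a, mid, lo, t)
--         if r is not None:
--             return r
--         return first_ge(node[2], mid, b, lo, t)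
--
--     n = len(sequence)
--     prev, first, second = 0, 0, 1000001
--     for start in range(n):
--         r = first_ge(root, 0, m, prev, prefix[start] + k)
--         e = n if r is None else r
--         if prefix[e] - prefix[start] == k and second - first > (e - 1) - start:
--             first, second = start, e - 1
--         prev = e
--     return [first, second]
-- ===== Notes on version B (the rewrite author's own statement) =====
-- stated objective: alternative
-- what changed: Replaces the inner sliding-window advance by a precomputed prefix-sum array plus a max segment tree whose descent finds the next window end (first index >= previous end with prefix sum >= target) directly, instead of accumulating a running interval sum element by element.
import Mathlib
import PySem

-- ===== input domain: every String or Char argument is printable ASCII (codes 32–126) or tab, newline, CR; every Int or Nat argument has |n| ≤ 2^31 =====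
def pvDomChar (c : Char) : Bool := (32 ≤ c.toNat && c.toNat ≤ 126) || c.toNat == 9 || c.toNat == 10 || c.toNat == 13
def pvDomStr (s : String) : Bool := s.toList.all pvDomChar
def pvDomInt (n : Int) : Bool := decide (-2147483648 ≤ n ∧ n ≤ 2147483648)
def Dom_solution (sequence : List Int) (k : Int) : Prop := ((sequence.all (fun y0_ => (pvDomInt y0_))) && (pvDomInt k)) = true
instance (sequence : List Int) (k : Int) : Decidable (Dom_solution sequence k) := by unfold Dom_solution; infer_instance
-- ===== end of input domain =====

-- B replaces the inner sliding-window advance by a prefix-sum array plus a max segment tree whose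
-- descent finds the next window end directly (an alternative algorithm of similar cost).

-- ===== PORT A =====
-- the inner 'while end < len(sequence) and interval_sum < k' loop
-- (sequence[end] is read only under the guard end < n, so pyGetD is exact there)
def solutionWhile (sequence : List Int) (k n e s : Int) : Int × Int :=
  if h : e < n ∧ s < k then
    solutionWhile sequence k n (e + 1) (s + PySem.List.pyGetD sequence e 0)
  else (e, s)
termination_by (n - e).toNat
decreasing_by omega

-- one iteration of the 'for start in range(len(sequence))' loop
def stepA (sequence : List Int) (k n : Int) (st : (Int × Int) × Int × Int) (start : Int) :
    (Int × Int) × Int × Int :=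
  let es := solutionWhile sequence k n st.1.1 st.1.2
  let fs := if es.2 = k ∧ st.2.2 - st.2.1 > (es.1 - 1) - start then (start, es.1 - 1) else st.2
  ((es.1, es.2 - PySem.List.pyGetD sequence start 0), fs)

def solution (sequence : List Int) (k : Int) : List Int :=
  let n : Int := PySem.List.len sequence
  let r := (PySem.List.pyRange 0 n 1).foldl (stepA sequence k n) ((0, 0), (0, 1000001))
  [r.2.1, r.2.2]

-- ===== PORT B =====
-- prefix = [0]; for x in sequence: prefix.append(prefix[-1] + x)
def prefixList (sequence : List Int) : List Int :=
  sequence.foldl (fun acc x => acc ++ [PySem.List.pyGetD acc (-1) 0 + x]) [0]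

-- Source B's tuples (v, None, None) / (mx, left, right); .top is the tuple's slot [0]
inductive SegTree where
  | leaf (v : Int)
  | node (mx : Int) (l r : SegTree)
deriving Repr, DecidableEq

def SegTree.top : SegTree → Int
  | .leaf v => v
  | .node mx _ _ => mx

-- Source B's build(a, b); Python recurses only on segments with b - a ≥ 1, so the '≤ 1' guard
-- (instead of '== 1') only totalises the unreached empty-segment case
def buildTree (pfx : List Int) (a b : Nat) : SegTree :=
  if b - a ≤ 1 then .leaf (PySem.List.pyGetD pfx (a : Int) 0)
  else
    let mid := (a + b) / 2
    let left := buildTree pfx a mid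
    let right := buildTree pfx mid b
    .node (max left.top right.top) left right
termination_by b - a
decreasing_by all_goals omega

-- Source B's first_ge(node, a, b, lo, t): first index i in [max(a,lo), b) with prefix[i] >= t
def firstGe (tr : SegTree) (a b lo : Nat) (t : Int) : Option Nat :=
  match tr with
  | .leaf v => if v < t ∨ b ≤ lo then none else some a
  | .node mx l r =>
    if mx < t ∨ b ≤ lo then none
    else
      match firstGe l a ((a + b) / 2) lo t with
      | some i => some i
      | none => firstGe r ((a + b) / 2) b lo t

-- one iteration of B's 'for start in range(n)' loop; state = (prev, first, second)
def stepB (root : SegTree) (pfx : List Int) (n : Nat) (k : Int) (st : Nat × Int × Int)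
    (start : Int) : Nat × Int × Int :=
  let r := firstGe root 0 (n + 1) st.1 (PySem.List.pyGetD pfx start 0 + k)
  let e : Nat := match r with | none => n | some i => i
  let fs := if PySem.List.pyGetD pfx (e : Int) 0 - PySem.List.pyGetD pfx start 0 = k ∧
                st.2.2 - st.2.1 > ((e : Int) - 1) - start
            then (start, (e : Int) - 1) else st.2
  (e, fs)

def solution_alt (sequence : List Int) (k : Int) : List Int :=
  let pfx := prefixList sequence
  let root := buildTree pfx 0 pfx.length
  let n := sequence.length
  let r := (PySem.List.pyRange 0 (PySem.List.len sequence) 1).foldl (stepB root pfx n k)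
      (0, 0, 1000001)
  [r.2.1, r.2.2]

-- ===== PRECONDITION & SPEC =====
def Spec_solution (sequence : List Int) (k : Int) (out : List Int) : Prop :=
  out = solution_alt sequence k
instance (sequence : List Int) (k : Int) (out : List Int) : Decidable (Spec_solution sequence k out) := by
  unfold Spec_solution; infer_instance

-- ===== CLAIM (what is proved, stated in full; the proofs are below) =====
def Claim_equal_solution : Prop := ∀ (sequence : List Int) (k : Int), Dom_solution sequence k →
  Spec_solution sequence k (solution sequence k)

-- ===== LEMMAS AND PROOFS =====

-- prefix sum of the first i elements
def psum (seq : List Int) (i : Nat) : Int := (seq.take i).sum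

-- Nat-level mirror of the while loop's final end pointer (c = psum of the current start)
def wEnd (seq : List Int) (k c : Int) (e : Nat) : Nat :=
  if h : e < seq.length ∧ psum seq e - c < k then wEnd seq k c (e + 1) else e
termination_by seq.length - e
decreasing_by omega

lemma psum_succ (seq : List Int) (i : Nat) (h : i < seq.length) :
    psum seq (i + 1) = psum seq i + seq[i] := by
  unfold psum
  rw [List.take_add_one, List.getElem?_eq_getElem h, List.sum_append]
  simp

-- the while loop computes wEnd and the corresponding prefix-sum difference
lemma while_eq (seq : List Int) (k c : Int) :
    ∀ (m e : Nat), seq.length - e ≤ m → e ≤ seq.length →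
      solutionWhile seq k (seq.length : Int) e (psum seq e - c) =
        ((wEnd seq k c e : Int), psum seq (wEnd seq k c e) - c) := by
  intro m
  induction m with
  | zero =>
    intro e hm he
    have he' : e = seq.length := by omega
    rw [solutionWhile, wEnd]
    have : ¬ ((e : Int) < (seq.length : Int) ∧ psum seq e - c < k) := by
      intro h; exact absurd h.1 (by omega)
    rw [dif_neg this, dif_neg (fun hh => absurd hh.1 (by omega))]
  | succ m ih =>
    intro e hm he
    rw [solutionWhile, wEnd]
    by_cases h : e < seq.length ∧ psum seq e - c < k
    · rw [dif_pos (by exact ⟨by exact_mod_cast h.1, h.2⟩), dif_pos h]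
      have hg : PySem.List.pyGetD seq (e : Int) 0 = seq[e] := by
        rw [PySem.List.pyGetD_natCast]
        exact List.getD_eq_getElem seq 0 h.1
      rw [hg]
      have : psum seq e - c + seq[e] = psum seq (e + 1) - c := by
        rw [psum_succ seq e h.1]; ring
      rw [this]
      exact_mod_cast ih (e + 1) (by omega) (by omega)
    · rw [dif_neg (by intro hh; exact h ⟨by exact_mod_cast hh.1, hh.2⟩), dif_neg h]

lemma wEnd_ge (seq : List Int) (k c : Int) : ∀ e, e ≤ wEnd seq k c e := by
  intro e
  induction e using wEnd.induct seq k c with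
  | case1 e h ih => rw [wEnd, dif_pos h]; omega
  | case2 e h => rw [wEnd, dif_neg h]

lemma wEnd_le (seq : List Int) (k c : Int) : ∀ e, e ≤ seq.length → wEnd seq k c e ≤ seq.length := by
  intro e
  induction e using wEnd.induct seq k c with
  | case1 e h ih => intro he; rw [wEnd, dif_pos h]; exact ih (by omega)
  | case2 e h => intro he; rw [wEnd, dif_neg h]; exact he

lemma wEnd_low (seq : List Int) (k c : Int) :
    ∀ e i, e ≤ i → i < wEnd seq k c e → psum seq i - c < k := by
  intro e
  induction e using wEnd.induct seq k c with
  | case1 e h ih =>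
    intro i hi hiw
    rw [wEnd, dif_pos h] at hiw
    rcases Nat.lt_or_ge e i with h' | h'
    · exact ih i (by omega) hiw
    · have : i = e := by omega
      subst this; exact h.2
  | case2 e h =>
    intro i hi hiw
    rw [wEnd, dif_neg h] at hiw; omega

lemma wEnd_exit (seq : List Int) (k c : Int) :
    ∀ e, e ≤ seq.length → wEnd seq k c e = seq.length ∨ ¬ psum seq (wEnd seq k c e) - c < k := by
  intro e
  induction e using wEnd.induct seq k c with
  | case1 e h ih => intro _; rw [wEnd, dif_pos h]; exact ih (by omega)
  | case2 e h =>
    intro he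
    rw [wEnd, dif_neg h]
    by_cases h1 : e < seq.length
    · right; intro h2; exact h ⟨h1, h2⟩
    · left; omega

-- running-sum scan used to characterise B's prefix list
def scanS (c : Int) : List Int → List Int
  | [] => []
  | x :: xs => (c + x) :: scanS (c + x) xs

lemma foldl_prefix (l : List Int) :
    ∀ (acc : List Int) (c : Int), acc ≠ [] → PySem.List.pyGetD acc (-1) 0 = c →
      l.foldl (fun acc x => acc ++ [PySem.List.pyGetD acc (-1) 0 + x]) acc = acc ++ scanS c l := by
  induction l with
  | nil => intro acc c _ _; simp [scanS]
  | cons x xs ih =>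
    intro acc c hne hlast
    simp only [List.foldl_cons, hlast, scanS]
    rw [ih (acc ++ [c + x]) (c + x) (by simp) (PySem.List.pyGetD_neg_one_append_singleton acc (c + x) 0)]
    simp

lemma scanS_eq (l : List Int) : ∀ c, scanS c l = (List.range l.length).map (fun i => c + (l.take (i + 1)).sum) := by
  induction l with
  | nil => intro c; simp [scanS]
  | cons x xs ih =>
    intro c
    simp only [scanS, List.length_cons, List.range_succ_eq_map, List.map_cons, List.map_map]
    rw [ih (c + x)]
    congr 1
    · simp
    · apply List.map_congr_left
      intro i _
      simp only [Function.comp_apply, List.take_succ_cons, List.sum_cons]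
      ring

lemma prefixList_eq (seq : List Int) :
    prefixList seq = (List.range (seq.length + 1)).map (psum seq) := by
  rw [prefixList, foldl_prefix seq [0] 0 (by simp) (by rfl)]
  rw [scanS_eq, List.range_succ_eq_map]
  simp [psum]

lemma pfx_len (seq : List Int) : (prefixList seq).length = seq.length + 1 := by
  rw [prefixList_eq]; simp

lemma pfx_getElem (seq : List Int) (i : Nat) (h : i < seq.length + 1) :
    (prefixList seq)[i]'(by rw [pfx_len]; omega) = psum seq i := by
  rw [List.getElem_of_eq (prefixList_eq seq)]
  simp

lemma pfx_getD (seq : List Int) (s : Nat) (hs : s ≤ seq.length) :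
    PySem.List.pyGetD (prefixList seq) (s : Int) 0 = psum seq s := by
  rw [PySem.List.pyGetD_natCast]
  rw [List.getD_eq_getElem _ 0 (by rw [pfx_len]; omega)]
  exact pfx_getElem seq s (by omega)

-- every value in the segment is bounded by the built node's stored max
lemma top_build (pfx : List Int) :
    ∀ (d a b : Nat), b - a ≤ d → ∀ i, a ≤ i → i < b →
      PySem.List.pyGetD pfx (i : Int) 0 ≤ (buildTree pfx a b).top := by
  intro d
  induction d with
  | zero => intro a b hd i h1 h2; omega
  | succ d ih =>
    intro a b hd i h1 h2
    rw [buildTree]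
    by_cases h : b - a ≤ 1
    · have : i = a := by omega
      subst this
      simp [SegTree.top, h]
    · rw [if_neg h]
      simp only [SegTree.top]
      rcases Nat.lt_or_ge i ((a + b) / 2) with h' | h'
      · exact le_trans (ih a ((a + b) / 2) (by omega) i h1 h') (le_max_left _ _)
      · exact le_trans (ih ((a + b) / 2) b (by omega) i h' h2) (le_max_right _ _)

-- the tree descent is the first-match search over the segment's indices
lemma firstGe_build (pfx : List Int) (lo : Nat) (t : Int) :
    ∀ (d a b : Nat), b - a ≤ d → a < b →
      firstGe (buildTree pfx a b) a b lo t =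
        (List.range' a (b - a)).find?
          (fun i => decide (lo ≤ i) && decide (t ≤ PySem.List.pyGetD pfx (i : Int) 0)) := by
  intro d
  induction d with
  | zero => intro a b hd hab; omega
  | succ d ih =>
    intro a b hd hab
    rw [buildTree]
    by_cases h : b - a ≤ 1
    · have hb : b - a = 1 := by omega
      rw [if_pos h, hb, List.range'_one, firstGe]
      by_cases hc : PySem.List.pyGetD pfx (a : Int) 0 < t ∨ b ≤ lo
      · rw [if_pos hc]
        rw [List.find?_cons_of_neg (by
          simp only [Bool.and_eq_true, decide_eq_true_eq, not_and]
          intro hlo ht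
          rcases hc with hc | hc
          · omega
          · omega), List.find?_nil]
      · rw [if_neg hc]
        rw [not_or, not_lt, Nat.not_le] at hc
        rw [List.find?_cons_of_pos (by
          simp only [Bool.and_eq_true, decide_eq_true_eq]
          exact ⟨by omega, by omega⟩)]
    · rw [if_neg h]
      have ham : a < (a + b) / 2 := by omega
      have hmb : (a + b) / 2 < b := by omega
      rw [firstGe]
      by_cases hc : max (buildTree pfx a ((a + b) / 2)).top (buildTree pfx ((a + b) / 2) b).top < t ∨ b ≤ lo
      · rw [if_pos hc]
        symm
        rw [List.find?_eq_none]
        intro i hi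
        rw [List.mem_range'_1] at hi
        simp only [Bool.and_eq_true, decide_eq_true_eq, not_and]
        intro hlo ht
        rcases hc with hc | hc
        · have htL : (buildTree pfx a ((a + b) / 2)).top < t :=
            lt_of_le_of_lt (le_max_left _ _) hc
          have htR : (buildTree pfx ((a + b) / 2) b).top < t :=
            lt_of_le_of_lt (le_max_right _ _) hc
          rcases Nat.lt_or_ge i ((a + b) / 2) with h' | h'
          · have hv := top_build pfx ((a + b) / 2 - a) a ((a + b) / 2) (by omega) i hi.1 h'
            exact absurd ht (by omega)
          · have hv := top_build pfx (b - (a + b) / 2) ((a + b) / 2) b (by omega) i h' (by omega)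
            exact absurd ht (by omega)
        · omega
      · rw [if_neg hc]
        have hsplit : List.range' a (b - a)
            = List.range' a ((a + b) / 2 - a) ++ List.range' ((a + b) / 2) (b - (a + b) / 2) := by
          have h2 : b - a = ((a + b) / 2 - a) + (b - (a + b) / 2) := by omega
          have h3 : a + ((a + b) / 2 - a) = (a + b) / 2 := by omega
          rw [h2, ← List.range'_append_1, h3]
        rw [hsplit, List.find?_append]
        rw [ih a ((a + b) / 2) (by omega) ham, ih ((a + b) / 2) b (by omega) hmb]
        cases (List.range' a ((a + b) / 2 - a)).find?
            (fun i => decide (lo ≤ i) && decide (t ≤ PySem.List.pyGetD pfx (i : Int) 0)) with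
        | none => simp [Option.or]
        | some i => simp [Option.or]

-- first-match search over a contiguous range, characterised by a witness and minimality
lemma find?_range'_first (p : Nat → Bool) :
    ∀ (cnt a w : Nat), a ≤ w → w < a + cnt → p w = true →
      (∀ j, a ≤ j → j < w → p j = false) → (List.range' a cnt).find? p = some w := by
  intro cnt
  induction cnt with
  | zero => intro a w h1 h2; omega
  | succ cnt ih =>
    intro a w h1 h2 hw hmin
    rw [List.range'_succ, List.find?_cons]
    by_cases ha : w = a
    · subst ha; rw [hw]
    · have : p a = false := hmin a (by omega) (by omega)
      rw [this]
      exact ih (a + 1) w (by omega) (by omega) hw (fun j hj1 hj2 => hmin j (by omega) hj2)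

-- the segment-tree lookup over the whole prefix array computes the while loop's end pointer
lemma firstGe_wEnd (seq : List Int) (k c : Int) (e : Nat) (he : e ≤ seq.length) :
    (match firstGe (buildTree (prefixList seq) 0 (seq.length + 1)) 0 (seq.length + 1) e (c + k) with
      | none => seq.length
      | some i => i) = wEnd seq k c e := by
  have hfg := firstGe_build (prefixList seq) e (c + k) (seq.length + 1) 0 (seq.length + 1)
      (by omega) (by omega)
  rw [Nat.sub_zero] at hfg
  rw [hfg]
  set W := wEnd seq k c e with hW
  have hWge : e ≤ W := wEnd_ge seq k c e
  have hWle : W ≤ seq.length := wEnd_le seq k c e he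
  have hlow : ∀ j, j < W → ¬ (e ≤ j ∧ c + k ≤ psum seq j) := by
    rintro j hj ⟨hje, hjs⟩
    have := wEnd_low seq k c e j hje hj
    omega
  rcases wEnd_exit seq k c e he with hex | hex
  all_goals rw [← hW] at hex
  · by_cases hn : c + k ≤ psum seq seq.length
    · rw [find?_range'_first _ (seq.length + 1) 0 W (by omega) (by omega)
        (by simp only [Bool.and_eq_true, decide_eq_true_eq]
            rw [pfx_getD seq W hWle]
            exact ⟨by omega, by rw [hex]; exact hn⟩)
        (by intro j h1 h2
            simp only [Bool.and_eq_true, decide_eq_true_eq, ← Bool.not_eq_true]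
            rw [pfx_getD seq j (by omega)]
            exact fun hh => hlow j h2 hh)]
    · have hnone : (List.range' 0 (seq.length + 1)).find?
          (fun i => decide (e ≤ i) && decide (c + k ≤ PySem.List.pyGetD (prefixList seq) (i : Int) 0))
          = none := by
        rw [List.find?_eq_none]
        intro i hi
        rw [List.mem_range'_1] at hi
        simp only [Bool.and_eq_true, decide_eq_true_eq, not_and]
        intro h1 h2
        rw [pfx_getD seq i (by omega)] at h2
        rcases Nat.lt_or_ge i W with h' | h'
        · exact absurd ⟨h1, h2⟩ (hlow i h')
        · have : i = seq.length := by omega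
          subst this
          exact absurd h2 (by rw [← hex]; omega)
      rw [hnone]
      exact hex.symm
  · rw [find?_range'_first _ (seq.length + 1) 0 W (by omega) (by omega)
      (by simp only [Bool.and_eq_true, decide_eq_true_eq]
          rw [pfx_getD seq W hWle]
          exact ⟨by omega, by omega⟩)
      (by intro j h1 h2
          simp only [Bool.and_eq_true, decide_eq_true_eq, ← Bool.not_eq_true]
          rw [pfx_getD seq j (by omega)]
          exact fun hh => hlow j h2 hh)]

-- the coupled loop invariant: A's fold (window state) and B's fold (prev pointer) agree
lemma main_loop (seq : List Int) (k : Int) :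
    ∀ (cnt s e : Nat) (f sec : Int), s + cnt = seq.length → e ≤ seq.length →
      (((List.range' s cnt).map (fun (i : Nat) => (i : Int))).foldl (stepA seq k (seq.length : Int))
        (((e : Int), psum seq e - psum seq s), (f, sec))).2
      = (((List.range' s cnt).map (fun (i : Nat) => (i : Int))).foldl
          (stepB (buildTree (prefixList seq) 0 (seq.length + 1)) (prefixList seq) seq.length k)
          (e, (f, sec))).2 := by
  intro cnt
  induction cnt with
  | zero => intro s e f sec _ _; simp
  | succ cnt ih =>
    intro s e f sec hn he
    have hs : s < seq.length := by omega
    rw [List.range'_succ, List.map_cons, List.foldl_cons, List.foldl_cons]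
    set W := wEnd seq k (psum seq s) e with hW
    have hWle : W ≤ seq.length := wEnd_le seq k (psum seq s) e he
    have hwhile := while_eq seq k (psum seq s) (seq.length - e) e (by omega) he
    have hstepA : stepA seq k (seq.length : Int) (((e : Int), psum seq e - psum seq s), (f, sec)) (s : Int)
        = (((W : Int), psum seq W - psum seq (s + 1)),
           if psum seq W - psum seq s = k ∧ sec - f > ((W : Int) - 1) - (s : Int)
           then ((s : Int), (W : Int) - 1) else (f, sec)) := by
      simp only [stepA, hwhile]
      have hg : PySem.List.pyGetD seq (s : Int) 0 = seq[s] := by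
        rw [PySem.List.pyGetD_natCast]; exact List.getD_eq_getElem seq 0 hs
      rw [hg]
      have : psum seq W - psum seq s - seq[s] = psum seq W - psum seq (s + 1) := by
        rw [psum_succ seq s hs]; ring
      rw [this]
    have hstepB : stepB (buildTree (prefixList seq) 0 (seq.length + 1)) (prefixList seq)
          seq.length k (e, (f, sec)) (s : Int)
        = (W, if psum seq W - psum seq s = k ∧ sec - f > ((W : Int) - 1) - (s : Int)
              then ((s : Int), (W : Int) - 1) else (f, sec)) := by
      simp only [stepB]
      rw [pfx_getD seq s (by omega)]
      rw [firstGe_wEnd seq k (psum seq s) e he, ← hW]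
      rw [pfx_getD seq W hWle]
    rw [hstepA, hstepB]
    exact ih (s + 1) W _ _ (by omega) hWle

-- ===== VERDICT (by name: the statement is the Claim_ definition above) =====
theorem solution_spec : Claim_equal_solution := by
  intro seq k _
  unfold Spec_solution solution solution_alt
  have hrange : PySem.List.pyRange 0 (seq.length : Int) 1
      = (List.range' 0 seq.length).map (fun (i : Nat) => (i : Int)) := by
    rw [PySem.List.pyRange_one]
    simp [List.range_eq_range']
  simp only [PySem.List.len_eq, pfx_len]
  rw [hrange]
  have := main_loop seq k seq.length 0 0 0 1000001 (by omega) (by omega)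
  simp only [Nat.cast_zero] at this
  have h0 : psum seq 0 - psum seq 0 = (0 : Int) := by simp
  rw [h0] at this
  rw [this]
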